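-- pv_equiv track=rewrite | github.com/tradingstrategy-ai/trading-strategy | tradingstrategy/binance/constants.py | split_binance_symbol
-- ===== SOURCE A (Python) =====
-- from typing import Tuple
--
-- BINANCE_SUPPORTED_QUOTE_TOKENS = ("USDT", "BUSD", "USDC")
--
-- def split_binance_symbol(symbol) -> Tuple[str, str]:
--     """Split a binance symbol into a base and quote token.
--
--     :param s: E.g. `ETHUSDT`
--     :return: (base_token, quote_token)
--     """
--     for currency in BINANCE_SUPPORTED_QUOTE_TOKENS:
--         if symbol.endswith(currency):
--             main_part = symbol[: -len(currency)]
--             currency_part = symbol[-len(currency) :]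
--             return main_part, currency_part
--     raise ValueError(
--         f"Unknown currency {symbol}. Currency needs to end with one of the supported quote tokens: {BINANCE_SUPPORTED_QUOTE_TOKENS}"
--     )
-- ===== SOURCE B (Python) =====
-- from typing import Tuple
--
-- BINANCE_SUPPORTED_QUOTE_TOKENS = ("USDT", "BUSD", "USDC")
--
-- _QUOTE_SET = frozenset(BINANCE_SUPPORTED_QUOTE_TOKENS)
--
--
-- def split_binance_symbol(symbol) -> Tuple[str, str]:
--     # Every supported quote token is exactly 4 characters long, so the
--     # candidate quote token is simply the last 4 characters of the symbol.
--     quote = symbol[-4:]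
--     if quote in _QUOTE_SET:
--         return symbol[:-4], quote
--     raise ValueError(
--         f"Unknown currency {symbol}. Currency needs to end with one of the supported quote tokens: {BINANCE_SUPPORTED_QUOTE_TOKENS}"
--     )
-- ===== Notes on version B (the rewrite author's own statement) =====
-- stated objective: simpler
-- what changed: Replaces the loop over candidate quote tokens with endswith tests by a single slice of the last 4 characters (all supported quote tokens have length 4) and one frozenset membership test.
import Mathlib
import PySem

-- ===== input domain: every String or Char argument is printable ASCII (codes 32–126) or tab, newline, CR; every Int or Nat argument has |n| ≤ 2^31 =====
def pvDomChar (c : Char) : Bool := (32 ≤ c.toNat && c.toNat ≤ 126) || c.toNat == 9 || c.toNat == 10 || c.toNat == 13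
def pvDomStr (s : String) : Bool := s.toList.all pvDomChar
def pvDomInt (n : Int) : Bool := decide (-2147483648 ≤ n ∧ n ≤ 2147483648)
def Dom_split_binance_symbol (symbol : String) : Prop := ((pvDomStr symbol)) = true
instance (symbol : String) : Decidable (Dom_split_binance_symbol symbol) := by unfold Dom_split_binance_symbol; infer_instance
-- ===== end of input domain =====

-- B replaces A's loop of endswith tests by one last-4-characters slice plus a membership test
-- (all supported quote tokens have length 4); objective: simpler. Equality proved on inputs
-- where the Python A returns (Pre_: the symbol ends with a supported quote token).


-- ===== PORT A =====
def pvBinanceQuotes : List String := ["USDT", "BUSD", "USDC"]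

-- A's for-loop over the quote-token tuple, as structural recursion over the same list.
def pvSplitLoop (symbol : String) : List String → String × String
  | [] => ("", "")        -- Python raises ValueError here; excluded by Pre_
  | currency :: rest =>
    if PySem.Str.endswith symbol currency then
      (PySem.Str.slice symbol none (some (-(PySem.Str.len currency : Int))),
       PySem.Str.slice symbol (some (-(PySem.Str.len currency : Int))) none)
    else pvSplitLoop symbol rest

def split_binance_symbol (symbol : String) : String × String :=
  pvSplitLoop symbol pvBinanceQuotes

-- ===== PORT B =====
def pvQuoteSet : PySem.Set String := PySem.Set.ofList ["USDT", "BUSD", "USDC"]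

def split_binance_symbol_alt (symbol : String) : String × String :=
  let quote := PySem.Str.slice symbol (some (-4)) none
  if PySem.Set.contains pvQuoteSet quote then
    (PySem.Str.slice symbol none (some (-4)), quote)
  else ("", "")            -- Python raises ValueError here; excluded by Pre_

-- ===== PRECONDITION & SPEC =====
-- Pre_: exactly the inputs on which the Python A returns (it raises ValueError otherwise).
def Pre_split_binance_symbol (symbol : String) : Prop :=
  PySem.Str.endswith symbol "USDT" = true ∨ PySem.Str.endswith symbol "BUSD" = true ∨
  PySem.Str.endswith symbol "USDC" = true
instance (symbol : String) : Decidable (Pre_split_binance_symbol symbol) := by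
  unfold Pre_split_binance_symbol; infer_instance

def pvWitness_split_binance_symbol : String := "ETHUSDT"

def Spec_split_binance_symbol (symbol : String) (out : String × String) : Prop := out = split_binance_symbol_alt symbol
instance (symbol : String) (out : String × String) : Decidable (Spec_split_binance_symbol symbol out) := by unfold Spec_split_binance_symbol; infer_instance

-- ===== CLAIM (what is proved, stated in full; the proofs are below) =====
def Claim_equal_split_binance_symbol : Prop := ∀ (symbol : String), Dom_split_binance_symbol symbol → Pre_split_binance_symbol symbol → Spec_split_binance_symbol symbol (split_binance_symbol symbol)

-- ===== LEMMAS AND PROOFS =====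

-- If t (of length 4) is a suffix of s, then s[-4:] = t.
lemma slice_last4 (s t : String) (ht : t.toList.length = 4)
    (h : t.toList <:+ s.toList) : PySem.Str.slice s (some (-4)) none = t := by
  obtain ⟨pre, hp⟩ := h
  apply String.toList_injective
  simp only [PySem.Str.toList_slice, PySem.Chars.slice_eq_listSlice]
  rw [PySem.List.slice_from_neg_ofNat _ 4 (by omega)]
  rw [← hp]
  have : (pre ++ t.toList).length - 4 = pre.length := by
    simp [List.length_append, ht]
  rw [this, List.drop_left]

lemma endswith_quote (s t : String) (h : PySem.Str.endswith s t = true) :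
    t.toList <:+ s.toList := by
  rw [PySem.Str.endswith_eq] at h
  exact (PySem.Chars.endswith_iff _ _).1 h

-- ===== VERDICT (by name: the statement is the Claim_ definition above) =====
theorem split_binance_symbol_spec : Claim_equal_split_binance_symbol := by
  intro symbol _ hpre
  unfold Spec_split_binance_symbol split_binance_symbol split_binance_symbol_alt

  have hU : "USDT".toList = ['U', 'S', 'D', 'T'] := by decide
  have hB : "BUSD".toList = ['B', 'U', 'S', 'D'] := by decide
  have hC : "USDC".toList = ['U', 'S', 'D', 'C'] := by decide
  by_cases h1 : PySem.Str.endswith symbol "USDT" = true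
  · have hq := slice_last4 symbol "USDT" (by decide) (endswith_quote _ _ h1)
    rw [PySem.Str.endswith_eq, hU] at h1
    simp [h1, hq, pvQuoteSet, pvSplitLoop, pvBinanceQuotes, PySem.Str.len]
  · have h1' := h1
    rw [PySem.Str.endswith_eq, hU, Bool.not_eq_true] at h1'
    by_cases h2 : PySem.Str.endswith symbol "BUSD" = true
    · have hq := slice_last4 symbol "BUSD" (by decide) (endswith_quote _ _ h2)
      rw [PySem.Str.endswith_eq, hB] at h2
      simp [h1', h2, hq, pvQuoteSet, pvSplitLoop, pvBinanceQuotes, PySem.Str.len]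
    · have h2' := h2
      rw [PySem.Str.endswith_eq, hB, Bool.not_eq_true] at h2'
      by_cases h3 : PySem.Str.endswith symbol "USDC" = true
      · have hq := slice_last4 symbol "USDC" (by decide) (endswith_quote _ _ h3)
        rw [PySem.Str.endswith_eq, hC] at h3
        simp [h1', h2', h3, hq, pvQuoteSet, pvSplitLoop, pvBinanceQuotes, PySem.Str.len]
      · rcases hpre with h | h | h <;> contradiction
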